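-- pv_equiv track=rewrite | github.com/goodarzilab/dms_utils | dms_utils/utils/dreem_original_functions.py | is_distmuts_valid
-- ===== SOURCE A (Python) =====
-- def is_distmuts_valid(bs):
--     """
--     """
--     for i in range(len(bs)):
--         if bs[i] == '1':
--             try:
--                 if i - latest_mutbit_index < 4:
--                     return False
--             except NameError:  # This happens the first time we see a '1'
--                 None
--             latest_mutbit_index = i
--     return True
-- ===== SOURCE B (Python) =====
-- def is_distmuts_valid(bs):
--     # Valid iff no length-4 sliding window contains two mutation bits:
--     # two '1's at distance < 4 lie together in some window bs[i:i+4].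
--     return all(bs[i:i + 4].count('1') <= 1 for i in range(len(bs)))
-- ===== Notes on version B (the rewrite author's own statement) =====
-- stated objective: simpler
-- what changed: Replaces A's stateful scan with a running latest-'1' index and a NameError trick by a sliding-window criterion: every length-4 window of the string contains at most one '1'.
import Mathlib
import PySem

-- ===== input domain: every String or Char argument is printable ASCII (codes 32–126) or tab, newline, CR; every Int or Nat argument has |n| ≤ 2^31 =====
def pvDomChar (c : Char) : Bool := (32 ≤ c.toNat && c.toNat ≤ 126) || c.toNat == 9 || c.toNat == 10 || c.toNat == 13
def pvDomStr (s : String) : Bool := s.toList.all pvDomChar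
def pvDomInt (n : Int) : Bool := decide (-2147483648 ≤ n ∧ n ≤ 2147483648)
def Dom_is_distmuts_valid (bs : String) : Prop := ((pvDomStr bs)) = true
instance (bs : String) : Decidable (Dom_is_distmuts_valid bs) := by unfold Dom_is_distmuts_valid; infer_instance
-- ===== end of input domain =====

-- B replaces A's stateful scan (running latest-'1' index plus the NameError trick) by a sliding-window
-- criterion — every length-4 window of bs contains at most one '1' — chosen for simplicity.

-- ===== PORT A =====
-- A's for-loop over indices: running index i, optional latest mutation index (unset until the first '1').
def pvLoopA : List Char → Nat → Option Nat → Bool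
  | [], _, _ => true
  | c :: rest, i, last =>
    if c = '1' then
      match last with
      | some j => if (i : Int) - (j : Int) < 4 then false else pvLoopA rest (i + 1) (some i)
      | none => pvLoopA rest (i + 1) (some i)
    else pvLoopA rest (i + 1) last

def is_distmuts_valid (bs : String) : Bool := pvLoopA bs.toList 0 none

-- ===== PORT B =====
-- all(bs[i:i+4].count('1') <= 1 for i in range(len(bs)))
def is_distmuts_valid_alt (bs : String) : Bool :=
  (List.range bs.toList.length).all (fun i =>
    decide ((PySem.List.slice bs.toList (some (i : Int)) (some ((i : Int) + 4))).count '1' ≤ 1))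

-- ===== PRECONDITION & SPEC =====
def Spec_is_distmuts_valid (bs : String) (out : Bool) : Prop := out = is_distmuts_valid_alt bs
instance (bs : String) (out : Bool) : Decidable (Spec_is_distmuts_valid bs out) := by unfold Spec_is_distmuts_valid; infer_instance

-- ===== CLAIM (what is proved, stated in full; the proofs are below) =====
def Claim_equal_is_distmuts_valid : Prop := ∀ (bs : String), Dom_is_distmuts_valid bs → Spec_is_distmuts_valid bs (is_distmuts_valid bs)

-- ===== LEMMAS AND PROOFS =====

-- positions of '1' bits, offset i (proof helper)
def pvOnes : List Char → Nat → List Nat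
  | [], _ => []
  | c :: rest, i => if c = '1' then i :: pvOnes rest (i + 1) else pvOnes rest (i + 1)

-- adjacent gaps ≥ 4 (proof helper)
def pvAdjOk : List Nat → Bool
  | a :: b :: rest => ((b : Int) - (a : Int) ≥ 4) && pvAdjOk (b :: rest)
  | _ => true

theorem pvLoop_none (cs : List Char) : ∀ i, pvLoopA cs i none = pvAdjOk (pvOnes cs i) := by
  have key : ∀ cs : List Char, ∀ i j, pvLoopA cs i (some j) = pvAdjOk (j :: pvOnes cs i) := by
    intro cs
    induction cs with
    | nil => intro i j; simp [pvLoopA, pvOnes, pvAdjOk]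
    | cons c rest ih =>
      intro i j
      by_cases h : c = '1'
      · simp [pvLoopA, pvOnes, h, ih, pvAdjOk]
        by_cases hlt : (i : Int) - (j : Int) < 4
        · simp [hlt]; try omega
        · simp [hlt]; try omega
      · simp [pvLoopA, pvOnes, h, ih]
  intro i
  induction cs generalizing i with
  | nil => simp [pvLoopA, pvOnes, pvAdjOk]
  | cons c rest ih =>
    by_cases h : c = '1'
    · simp [pvLoopA, pvOnes, h, key]
    · simp [pvLoopA, pvOnes, h, ih]

theorem pvOnes_shift (cs : List Char) : ∀ i, pvOnes cs (i + 1) = (pvOnes cs i).map (· + 1) := by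
  induction cs with
  | nil => intro i; simp [pvOnes]
  | cons c rest ih =>
    intro i
    by_cases h : c = '1' <;> simp [pvOnes, h, ih]

theorem pvAdjOk_shift (l : List Nat) : pvAdjOk (l.map (· + 1)) = pvAdjOk l := by
  induction l with
  | nil => rfl
  | cons a t ih =>
    cases t with
    | nil => rfl
    | cons b r =>
      simp only [List.map, pvAdjOk] at *
      rw [ih]
      congr 1
      simp only [decide_eq_decide]
      push_cast
      omega

-- count of '1' in the first k chars is 0 iff the first '1' position (if any) is ≥ k
theorem pvFirstOne (cs : List Char) : ∀ k : Nat,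
    ((cs.take k).count '1' = 0 ↔ (match pvOnes cs 0 with | [] => True | a :: _ => k ≤ a)) := by
  induction cs with
  | nil => intro k; simp [pvOnes]
  | cons c rest ih =>
    intro k
    by_cases h : c = '1'
    · cases k with
      | zero => simp [pvOnes, h]
      | succ j => simp [pvOnes, h]
    · have hsh : pvOnes (c :: rest) 0 = (pvOnes rest 0).map (· + 1) := by
        simp [pvOnes, h, pvOnes_shift]
      cases k with
      | zero =>
        simp only [List.take_zero, List.count_nil, hsh]
        cases pvOnes rest 0 <;> simp
      | succ j =>
        simp only [List.take_succ_cons, List.count_cons, hsh]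
        have := ih j
        cases hb : pvOnes rest 0 with
        | nil => rw [hb] at this; simp [h, this]
        | cons a t => rw [hb] at this; simp [h, this]

theorem pvCntMono (cs : List Char) (j k : Nat) (hjk : j ≤ k) :
    (cs.take j).count '1' ≤ (cs.take k).count '1' := by
  have : cs.take j = (cs.take k).take j := by rw [List.take_take, Nat.min_eq_left hjk]
  rw [this]
  exact (List.take_sublist j (cs.take k)).count_le '1'

theorem pvGcons_one (rest : List Char) :
    pvAdjOk (pvOnes ('1' :: rest) 0) =
      (decide ((rest.take 3).count '1' = 0) && pvAdjOk (pvOnes rest 0)) := by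
  have hF := pvFirstOne rest 3
  have h0 : pvOnes ('1' :: rest) 0 = 0 :: (pvOnes rest 0).map (· + 1) := by
    simp [pvOnes, pvOnes_shift]
  rw [h0]
  cases hb : pvOnes rest 0 with
  | nil =>
    rw [hb] at hF
    simp [pvAdjOk, hF.mpr trivial]
  | cons a t =>
    rw [hb] at hF
    have hs : pvAdjOk ((a + 1) :: t.map (· + 1)) = pvAdjOk (a :: t) := pvAdjOk_shift (a :: t)
    simp only [List.map_cons]
    rw [show pvAdjOk (0 :: (a + 1) :: t.map (· + 1)) =
          (decide ((((a + 1 : Nat) : Int)) - ((0 : Nat) : Int) ≥ 4) && pvAdjOk ((a + 1) :: t.map (· + 1))) from rfl,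
        hs]
    congr 1
    simp only [decide_eq_decide]
    rw [show (match a :: t with | [] => True | a :: _ => 3 ≤ a) = (3 ≤ a) from rfl] at hF
    rw [hF]
    push_cast
    omega

theorem pvGcons_not (c : Char) (rest : List Char) (h : ¬ c = '1') :
    pvAdjOk (pvOnes (c :: rest) 0) = pvAdjOk (pvOnes rest 0) := by
  simp [pvOnes, h, pvOnes_shift, pvAdjOk_shift]

theorem pvM (cs : List Char) (hG : pvAdjOk (pvOnes cs 0) = true) :
    (cs.take 3).count '1' ≤ 1 := by
  induction cs with
  | nil => simp
  | cons c rest ih =>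
    by_cases h : c = '1'
    · subst h
      rw [pvGcons_one] at hG
      have h3 : (rest.take 3).count '1' = 0 := by
        rcases Bool.and_eq_true_iff.mp hG with ⟨h1, _⟩
        exact of_decide_eq_true h1
      have h2 : (rest.take 2).count '1' = 0 :=
        Nat.le_zero.mp (h3 ▸ pvCntMono rest 2 3 (by omega))
      simp [h2]
    · rw [pvGcons_not c rest h] at hG
      have h3 := ih hG
      have h2 : (rest.take 2).count '1' ≤ 1 := le_trans (pvCntMono rest 2 3 (by omega)) h3
      simp [h, h2]

-- the window check on the list side
def pvW (cs : List Char) : Bool :=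
  (List.range cs.length).all (fun i => decide (((cs.drop i).take 4).count '1' ≤ 1))

theorem pvW_cons (c : Char) (rest : List Char) :
    pvW (c :: rest) = (decide (((c :: rest).take 4).count '1' ≤ 1) && pvW rest) := by
  simp only [pvW, List.length_cons, List.range_succ_eq_map, List.all_cons, List.all_map,
    List.drop_zero]
  rfl

theorem pvW_eq (cs : List Char) : pvW cs = pvAdjOk (pvOnes cs 0) := by
  induction cs with
  | nil => rfl
  | cons c rest ih =>
    rw [pvW_cons, ih]
    by_cases h : c = '1'
    · subst h
      rw [pvGcons_one]
      have : (('1' :: rest).take 4).count '1' = 1 + (rest.take 3).count '1' := by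
        simp; omega
      rw [this]
      by_cases h0 : (rest.take 3).count '1' = 0 <;> simp [h0]
    · rw [pvGcons_not c rest h]
      have hwin : (((c :: rest).take 4).count '1') = (rest.take 3).count '1' := by
        simp [h]
      rw [hwin]
      by_cases hg : pvAdjOk (pvOnes rest 0) = true
      · simp [hg, pvM rest hg]
      · simp [Bool.eq_false_iff.mpr hg]

theorem pvAlt_eq_W (bs : String) : is_distmuts_valid_alt bs = pvW bs.toList := by
  unfold is_distmuts_valid_alt pvW
  congr 1
  funext i
  congr 2
  have : ((i : Int) + 4) = ((i : Int) + ((4 : Nat) : Int)) := by norm_num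
  rw [this, PySem.List.slice_natCast_add]

-- ===== VERDICT (by name: the statement is the Claim_ definition above) =====
theorem is_distmuts_valid_spec : Claim_equal_is_distmuts_valid := by
  intro bs _
  unfold Spec_is_distmuts_valid is_distmuts_valid
  rw [pvAlt_eq_W, pvW_eq, pvLoop_none]
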